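-- pv_equiv track=rewrite | github.com/Waseem12wa/Video-Crafter | video_overlay_script.py | _find_exact_phrase_match
-- ===== SOURCE A (Python) =====
-- from typing import Dict, List, Optional, Sequence, Tuple
--
-- def _find_exact_phrase_match(
--     transcript_words: Sequence[str],
--     tokens: Sequence[str],
--     occurrence: int,
--     start_index: int,
-- ) -> Optional[Tuple[int, int]]:
--     """Return the ``occurrence``-th exact match after ``start_index`` if available."""
--
--     token_list = list(tokens)
--     target_len = len(token_list)
--     if target_len == 0:
--         return None
--
--     match_count = 0
--     for idx in range(start_index, len(transcript_words) - target_len + 1):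
--         if transcript_words[idx : idx + target_len] == token_list:
--             match_count += 1
--             if match_count == occurrence:
--                 return idx, idx + target_len - 1
--     return None
-- ===== SOURCE B (Python) =====
-- def _find_exact_phrase_match(transcript_words, tokens, occurrence, start_index):
--     """Occurrence-th exact phrase match at or after start_index, selected from a
--     precomputed list of all match positions (candidate windows limited to
--     positions of the first token)."""
--     words = list(transcript_words)
--     pat = list(tokens)
--     t = len(pat)
--     if t == 0:
--         return None
--     matches = [p for p in range(len(words) - t + 1)
--                if words[p] == pat[0] and words[p:p + t] == pat]
--     hits = [p for p in matches if p >= start_index]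
--     if 0 < occurrence <= len(hits):
--         i = hits[occurrence - 1]
--         return i, i + t - 1
--     return None
-- ===== Notes on version B (the rewrite author's own statement) =====
-- stated objective: alternative
-- what changed: B precomputes the list of all phrase-match positions in one pass (candidate windows limited to positions of the first token) and then selects the occurrence-th hit arithmetically, instead of A's stateful scan from start_index with a running match counter; Pre_ excludes negative start_index, on which A's negative-index slice wraparound can count phantom matches near the end of the list.
-- outside the precondition, e.g. on _find_exact_phrase_match(['a', 'b', 'a', 'b'], ['a', 'b'], 1, -4): A returns (-4, -3), B returns (0, 1)
import Mathlib
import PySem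

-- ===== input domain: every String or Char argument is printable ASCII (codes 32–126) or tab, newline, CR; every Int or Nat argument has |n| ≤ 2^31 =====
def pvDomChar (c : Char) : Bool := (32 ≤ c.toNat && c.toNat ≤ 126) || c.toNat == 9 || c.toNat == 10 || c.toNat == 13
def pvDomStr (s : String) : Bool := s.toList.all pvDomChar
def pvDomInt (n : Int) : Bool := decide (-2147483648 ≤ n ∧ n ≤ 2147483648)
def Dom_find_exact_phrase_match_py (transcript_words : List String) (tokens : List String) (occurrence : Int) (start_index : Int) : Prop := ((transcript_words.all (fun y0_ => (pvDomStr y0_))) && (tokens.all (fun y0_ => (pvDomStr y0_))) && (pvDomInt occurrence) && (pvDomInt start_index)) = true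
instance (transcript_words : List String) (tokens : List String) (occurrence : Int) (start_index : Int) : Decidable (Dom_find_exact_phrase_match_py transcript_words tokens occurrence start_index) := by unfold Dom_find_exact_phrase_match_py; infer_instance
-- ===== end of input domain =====

-- B precomputes the list of all match positions once (candidates limited to positions of the
-- first token) and selects the occurrence-th hit arithmetically (alternative structure, same
-- asymptotic cost); Pre_ restricts to nonnegative start_index, the function's natural domain.

-- ===== PORT A =====
-- the 'for idx in range(...)' loop of A, with its running match_count
def pvALoop (words pat : List String) (occurrence t : Int) : List Int → Int → Option (Int × Int)
  | [], _ => none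
  | idx :: rest, match_count =>
    if PySem.List.slice words (some idx) (some (idx + t)) == pat then
      if match_count + 1 == occurrence then some (idx, idx + t - 1)
      else pvALoop words pat occurrence t rest (match_count + 1)
    else pvALoop words pat occurrence t rest match_count

def find_exact_phrase_match_py (transcript_words : List String) (tokens : List String) (occurrence : Int) (start_index : Int) : Option (Int × Int) :=
  let token_list := tokens
  let target_len : Int := (token_list.length : Int)
  if target_len == 0 then none
  else
    pvALoop transcript_words token_list occurrence target_len
      (PySem.List.pyRange start_index ((transcript_words.length : Int) - target_len + 1)) 0

-- ===== PORT B =====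
def find_exact_phrase_match_py_alt (transcript_words : List String) (tokens : List String) (occurrence : Int) (start_index : Int) : Option (Int × Int) :=
  let words := transcript_words
  let pat := tokens
  let t : Int := (pat.length : Int)
  if t == 0 then none
  else
    let matchlist := (PySem.List.pyRange 0 ((words.length : Int) - t + 1)).filter
      (fun p => PySem.List.pyGetD words p "" == PySem.List.pyGetD pat 0 ""
        && PySem.List.slice words (some p) (some (p + t)) == pat)
    let hits := matchlist.filter (fun p => start_index ≤ p)
    if 0 < occurrence && occurrence ≤ (hits.length : Int) then
      let i := PySem.List.pyGetD hits (occurrence - 1) 0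
      some (i, i + t - 1)
    else none

-- ===== PRECONDITION & SPEC =====
-- Pre_ excludes negative start_index (on which A still returns): there A scans negative window
-- starts, whose Python slices wrap around to the end of the list — an artefact outside the
-- function's natural 'from this position onward' domain.
def Pre_find_exact_phrase_match_py (transcript_words : List String) (tokens : List String) (occurrence : Int) (start_index : Int) : Prop := 0 ≤ start_index
instance (transcript_words : List String) (tokens : List String) (occurrence : Int) (start_index : Int) : Decidable (Pre_find_exact_phrase_match_py transcript_words tokens occurrence start_index) := by unfold Pre_find_exact_phrase_match_py; infer_instance
def pvWitness_find_exact_phrase_match_py : List String × List String × Int × Int := (["a", "b", "a"], ["a"], 2, 0)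

def Spec_find_exact_phrase_match_py (transcript_words : List String) (tokens : List String) (occurrence : Int) (start_index : Int) (out : Option (Int × Int)) : Prop := out = find_exact_phrase_match_py_alt transcript_words tokens occurrence start_index
instance (transcript_words : List String) (tokens : List String) (occurrence : Int) (start_index : Int) (out : Option (Int × Int)) : Decidable (Spec_find_exact_phrase_match_py transcript_words tokens occurrence start_index out) := by unfold Spec_find_exact_phrase_match_py; infer_instance

-- ===== CLAIM =====
def Claim_equal_find_exact_phrase_match_py : Prop := ∀ (transcript_words : List String) (tokens : List String) (occurrence : Int) (start_index : Int), Dom_find_exact_phrase_match_py transcript_words tokens occurrence start_index → Pre_find_exact_phrase_match_py transcript_words tokens occurrence start_index → Spec_find_exact_phrase_match_py transcript_words tokens occurrence start_index (find_exact_phrase_match_py transcript_words tokens occurrence start_index)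

-- ===== LEMMAS AND PROOFS =====

-- the slice-comparison test of A at window start idx
def pvM (words pat : List String) (idx : Int) : Bool :=
  PySem.List.slice words (some idx) (some (idx + (pat.length : Int))) == pat

-- A's loop returns the (occurrence - match_count)-th matching index of the remaining range
lemma pvALoop_eq (words pat : List String) (occ : Int) (L : List Int) (c : Int) :
    pvALoop words pat occ (pat.length : Int) L c =
      if occ ≤ c then none
      else ((L.filter (pvM words pat))[(occ - c - 1).toNat]?).map (fun i => (i, i + (pat.length : Int) - 1)) := by
  induction L generalizing c with
  | nil => simp [pvALoop]
  | cons idx rest ih =>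
    by_cases hm : pvM words pat idx = true
    · by_cases hocc : occ = c + 1
      · simp only [pvALoop]
        rw [if_pos (by simpa [pvM] using hm), if_pos (by simp [hocc])]
        rw [if_neg (by omega)]
        simp [hm, hocc]
      · simp only [pvALoop]
        rw [if_pos (by simpa [pvM] using hm), if_neg (by simp; omega)]
        rw [ih (c + 1)]
        by_cases hle : occ ≤ c
        · rw [if_pos (by omega), if_pos hle]
        · rw [if_neg (by omega), if_neg hle]
          simp only [List.filter_cons, hm, if_pos]
          have hk : (occ - c - 1).toNat = (occ - (c + 1) - 1).toNat + 1 := by omega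
          rw [hk]
          simp
    · simp only [pvALoop, pvM] at *
      rw [if_neg (by simpa [pvM] using hm)]
      rw [ih c]
      simp [hm, pvM]

-- a match of a nonempty pat at a window start 0 ≤ p forces words[p] = pat[0]
lemma pvM_head (words pat : List String) (p : Int) (hpat : pat ≠ []) (hp : 0 ≤ p)
    (hm : pvM words pat p = true) :
    PySem.List.pyGetD words p "" = PySem.List.pyGetD pat 0 "" := by
  have ht : 0 < pat.length := List.length_pos_iff.mpr hpat
  simp only [pvM, beq_iff_eq] at hm
  rw [PySem.List.slice_toNat words hp (by omega)] at hm
  have hcnt : ((p + (pat.length : Int)).toNat - p.toNat) = pat.length := by omega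
  rw [hcnt] at hm
  have hlt : p.toNat < words.length := by
    by_contra hge
    rw [List.drop_eq_nil_of_le (Nat.le_of_not_lt hge)] at hm
    simp at hm
    exact hpat hm
  have h0 : pat[0]? = some words[p.toNat] := by
    rw [← hm]
    rw [List.getElem?_take_of_lt ht]
    simp [List.getElem?_drop]
  have h0' : pat[0]'ht = words[p.toNat]'hlt := by
    have := List.getElem?_eq_getElem (l := pat) (i := 0) ht
    rw [this] at h0
    exact Option.some.inj h0
  rw [PySem.List.pyGetD_eq_getElem words "" hp (by omega),
      PySem.List.pyGetD_eq_getElem pat "" (by omega) (by omega)]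
  simpa using h0'.symm

-- two strictly increasing Int lists with the same members are equal
lemma pv_sorted_ext (l₁ l₂ : List Int) (h₁ : l₁.Pairwise (· < ·)) (h₂ : l₂.Pairwise (· < ·))
    (hmem : ∀ x, x ∈ l₁ ↔ x ∈ l₂) : l₁ = l₂ := by
  have hn₁ : l₁.Nodup := h₁.imp (fun h => ne_of_lt h)
  have hn₂ : l₂.Nodup := h₂.imp (fun h => ne_of_lt h)
  have hperm : l₂.Perm l₁ := (List.perm_ext_iff_of_nodup hn₂ hn₁).mpr (fun a => (hmem a).symm)
  have e1 : PySem.List.sorted l₁ id = l₁ :=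
    PySem.List.sorted_eq_of_perm_of_pairwise_lt l₁ l₁ id (List.Perm.refl l₁) (by simpa using h₁)
  have e2 : PySem.List.sorted l₁ id = l₂ :=
    PySem.List.sorted_eq_of_perm_of_pairwise_lt l₁ l₂ id hperm (by simpa using h₂)
  rw [← e1, e2]

-- MAIN: for 0 ≤ s, A's filtered scan range equals B's hit list
lemma pv_main (words pat : List String) (s : Int) (hpat : pat ≠ []) (hs : 0 ≤ s) :
    (PySem.List.pyRange s ((words.length : Int) - (pat.length : Int) + 1)).filter (pvM words pat) =
      ((PySem.List.pyRange 0 ((words.length : Int) - (pat.length : Int) + 1)).filter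
          (fun p => PySem.List.pyGetD words p "" == PySem.List.pyGetD pat 0 ""
            && PySem.List.slice words (some p) (some (p + (pat.length : Int))) == pat)).filter
          (fun p => s ≤ p) := by
  apply pv_sorted_ext
  · exact (PySem.List.pairwise_lt_pyRange_one _ _).filter _
  · exact ((PySem.List.pairwise_lt_pyRange_one _ _).filter _).filter _
  · intro x
    simp only [List.mem_filter, PySem.List.mem_pyRange_one, Bool.and_eq_true, decide_eq_true_eq]
    constructor
    · rintro ⟨⟨hsx, hxe⟩, hmx⟩
      have hh := pvM_head words pat x hpat (by omega) hmx
      exact ⟨⟨⟨by omega, hxe⟩, ⟨by simp [hh], hmx⟩⟩, hsx⟩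
    · rintro ⟨⟨⟨hp0, hpe⟩, _, hm⟩, hsx⟩
      exact ⟨⟨hsx, hpe⟩, hm⟩

-- ===== VERDICT (by name: the statement is the Claim_ definition above) =====
theorem find_exact_phrase_match_py_spec : Claim_equal_find_exact_phrase_match_py := by
  intro words pat occ s _ hs
  unfold Spec_find_exact_phrase_match_py
  by_cases hpat : pat = []
  · subst hpat
    simp [find_exact_phrase_match_py, find_exact_phrase_match_py_alt]
  · have ht : 0 < pat.length := List.length_pos_iff.mpr hpat
    simp only [find_exact_phrase_match_py, find_exact_phrase_match_py_alt]
    rw [if_neg (by simp; omega), if_neg (by simp; omega)]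
    rw [pvALoop_eq]
    rw [← pv_main words pat s hpat hs]
    set H := (PySem.List.pyRange s ((words.length : Int) - (pat.length : Int) + 1)).filter (pvM words pat) with hH
    by_cases hocc : occ ≤ 0
    · rw [if_pos hocc, if_neg (by simp; omega)]
    · rw [if_neg hocc, show occ - 0 - 1 = occ - 1 by ring]
      by_cases hlen : occ ≤ (H.length : Int)
      · rw [if_pos (by simp; omega)]
        have hb : (occ - 1).toNat < H.length := by omega
        rw [List.getElem?_eq_getElem hb]
        rw [PySem.List.pyGetD_eq_getElem H 0 (by omega) (by omega)]
        simp
      · rw [if_neg (by simp; omega)]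
        rw [List.getElem?_eq_none (by omega)]
        simp
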